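-- pv_equiv track=rewrite | github.com/Yoonkyo/algorithm_code | leetcode/2264_SameDigit.py | largestGoodInteger
-- ===== SOURCE A (Python) =====
-- def largestGoodInteger(num: str) -> str:
--     check = 0
--     prev = ""
--     result = ""
--     for i in num:
--         if i == prev:
--             check += 1
--         else:
--             check = 0
--         if check >= 2 and i*3 > result:
--             result = i*3
--         prev = i
--     return result
-- ===== SOURCE B (Python) =====
-- def largestGoodInteger(num: str) -> str:
--     cands = [c for c in set(num) if c * 3 in num]
--     return max(cands) * 3 if cands else ""
-- ===== Notes on version B (the rewrite author's own statement) =====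
-- stated objective: idiomatic
-- what changed: Replaces A's stateful run-length scan (check/prev/result accumulators) by enumerating the distinct characters of num and keeping the maximum whose tripled string is a substring of num.
import Mathlib
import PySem

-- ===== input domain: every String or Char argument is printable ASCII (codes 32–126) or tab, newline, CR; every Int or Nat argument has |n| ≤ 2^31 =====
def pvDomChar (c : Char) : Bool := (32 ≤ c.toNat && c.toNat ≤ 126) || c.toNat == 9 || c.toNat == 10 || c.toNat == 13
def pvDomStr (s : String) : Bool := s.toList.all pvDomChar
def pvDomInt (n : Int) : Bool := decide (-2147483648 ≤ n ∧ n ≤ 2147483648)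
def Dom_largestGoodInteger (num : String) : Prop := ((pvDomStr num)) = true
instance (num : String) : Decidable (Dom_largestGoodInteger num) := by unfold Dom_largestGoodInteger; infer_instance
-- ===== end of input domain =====

-- B replaces A's run-length single pass by enumerating the distinct characters and
-- testing each triple for substring membership, returning the maximum (objective: idiomatic).

-- ===== PORT A =====
def largestGoodInteger (num : String) : String :=
  let fin := num.toList.foldl
    (fun st i =>
      let check : Int := if [i] = st.2.1 then st.1 + 1 else 0
      let result := if 2 ≤ check ∧ st.2.2 < [i, i, i] then [i, i, i] else st.2.2
      (check, [i], result))
    ((0 : Int), ([] : List Char), ([] : List Char))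
  String.ofList fin.2.2

-- ===== PORT B =====
def largestGoodInteger_alt (num : String) : String :=
  let cands := (PySem.Set.ofList num.toList).filter
    (fun c => PySem.Chars.isIn [c, c, c] num.toList)
  match PySem.List.max? cands (fun c => c) with
  | some m => String.ofList [m, m, m]
  | none => ""

-- ===== PRECONDITION & SPEC =====
def Spec_largestGoodInteger (num : String) (out : String) : Prop := out = largestGoodInteger_alt num
instance (num : String) (out : String) : Decidable (Spec_largestGoodInteger num out) := by unfold Spec_largestGoodInteger; infer_instance

-- ===== CLAIM (what is proved, stated in full; the proofs are below) =====
def Claim_equal_largestGoodInteger : Prop := ∀ (num : String), Dom_largestGoodInteger num → Spec_largestGoodInteger num (largestGoodInteger num)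

-- ===== LEMMAS AND PROOFS =====

-- trailing-run length of a list (length of the maximal constant suffix)
def pvTrail (l : List Char) : Nat :=
  match l.reverse with
  | [] => 0
  | a :: t => 1 + (t.takeWhile (· == a)).length

-- "r is what A's result accumulator may hold after scanning l"
def GoodRes (l r : List Char) : Prop :=
  (r = [] ∧ ∀ c : Char, ¬ ([c, c, c] <:+: l)) ∨
  (∃ m : Char, r = [m, m, m] ∧ [m, m, m] <:+: l ∧ ∀ c : Char, [c, c, c] <:+: l → c ≤ m)

lemma pvTrail_append (l : List Char) (x : Char) :
    pvTrail (l ++ [x]) = if l.getLast? = some x then pvTrail l + 1 else 1 := by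
  unfold pvTrail
  rw [List.reverse_append]
  simp only [List.reverse_cons, List.reverse_nil, List.nil_append, List.cons_append]
  rcases h : l.reverse with _ | ⟨a, t⟩
  · have : l = [] := by simpa using congrArg List.reverse h
    subst this; simp
  · have hl : l.getLast? = some a := by
      rw [← List.head?_reverse, h]; rfl
    rw [hl]
    by_cases hax : a = x
    · subst hax
      simp [Nat.add_comm]
    · simp [hax]

lemma pvTrail_pos_of_ne_nil (l : List Char) (h : l ≠ []) : 1 ≤ pvTrail l := by
  unfold pvTrail
  rcases hr : l.reverse with _ | ⟨a, t⟩
  · exact absurd (by simpa using congrArg List.reverse hr) h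
  · exact Nat.le_add_right 1 _

lemma pair_prefix_takeWhile (v : Char) (r : List Char) :
    [v, v] <+: r ↔ 2 ≤ (r.takeWhile (· == v)).length := by
  rcases r with _ | ⟨a, r⟩
  · simp
  · simp only [List.cons_prefix_cons, List.takeWhile_cons]
    by_cases hav : v = a
    · subst hav
      rcases r with _ | ⟨b, r⟩
      · simp
      · simp only [List.cons_prefix_cons, List.takeWhile_cons, beq_self_eq_true, if_true]
        by_cases hbv : v = b
        · subst hbv; simp
        · simp [hbv, Ne.symm hbv]
    · simp [hav, Ne.symm hav]

lemma triple_suffix_iff_trail (l : List Char) (x : Char) :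
    ([x, x, x] <:+ (l ++ [x])) ↔ 3 ≤ pvTrail (l ++ [x]) := by
  rw [← List.reverse_prefix]
  unfold pvTrail
  rw [List.reverse_append]
  simp only [List.reverse_cons, List.reverse_nil, List.nil_append, List.cons_append,
    List.cons_prefix_cons, true_and]
  rw [pair_prefix_takeWhile]
  omega

lemma infix_append_singleton {sub l : List Char} {x : Char} :
    sub <:+: (l ++ [x]) ↔ sub <:+: l ∨ sub <:+ (l ++ [x]) := by
  constructor
  · rintro ⟨s, t, h⟩
    rcases t.eq_nil_or_concat with rfl | ⟨t', y, rfl⟩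
    · right; exact ⟨s, by simpa using h⟩
    · left
      rw [List.concat_eq_append,
        show s ++ sub ++ (t' ++ [y]) = (s ++ sub ++ t') ++ [y] by simp] at h
      obtain ⟨h1, h2⟩ := List.append_inj' h rfl
      exact ⟨s, t', by simpa using h1⟩
  · rintro (h | h)
    · exact h.trans ⟨[], [x], by simp⟩
    · exact h.isInfix

lemma triple_infix_append (l : List Char) (x c : Char) :
    ([c, c, c] <:+: (l ++ [x])) ↔ ([c, c, c] <:+: l) ∨ (c = x ∧ 3 ≤ pvTrail (l ++ [x])) := by
  rw [infix_append_singleton]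
  constructor
  · rintro (h | h)
    · exact Or.inl h
    · have hc : c = x := by
        obtain ⟨s, hs⟩ := h
        have := congrArg List.getLast? hs
        simpa using this
      exact Or.inr ⟨hc, (triple_suffix_iff_trail l x).mp (by rwa [hc] at h)⟩
  · rintro (h | ⟨rfl, h⟩)
    · exact Or.inl h
    · exact Or.inr ((triple_suffix_iff_trail l c).mpr h)

lemma triple_lt_triple (a b : Char) : (([a, a, a] : List Char) < [b, b, b]) ↔ a < b := by
  constructor
  · intro h
    rcases List.cons_lt_cons_iff.mp h with h1 | ⟨rfl, h2⟩
    · exact h1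
    · rcases List.cons_lt_cons_iff.mp h2 with h1 | ⟨-, h3⟩
      · exact h1
      · rcases List.cons_lt_cons_iff.mp h3 with h1 | ⟨-, h4⟩
        · exact h1
        · cases h4
  · intro h; exact List.cons_lt_cons_iff.mpr (Or.inl h)

lemma foldA_spec (l : List Char) :
    (l.foldl
      (fun st i =>
        let check : Int := if [i] = st.2.1 then st.1 + 1 else 0
        let result := if 2 ≤ check ∧ st.2.2 < [i, i, i] then [i, i, i] else st.2.2
        (check, [i], result))
      ((0 : Int), ([] : List Char), ([] : List Char))).2.1
      = (match l.getLast? with | none => ([] : List Char) | some a => [a]) ∧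
    (l.foldl
      (fun st i =>
        let check : Int := if [i] = st.2.1 then st.1 + 1 else 0
        let result := if 2 ≤ check ∧ st.2.2 < [i, i, i] then [i, i, i] else st.2.2
        (check, [i], result))
      ((0 : Int), ([] : List Char), ([] : List Char))).1
      = (if l = [] then (0 : Int) else (pvTrail l : Int) - 1) ∧
    GoodRes l (l.foldl
      (fun st i =>
        let check : Int := if [i] = st.2.1 then st.1 + 1 else 0
        let result := if 2 ≤ check ∧ st.2.2 < [i, i, i] then [i, i, i] else st.2.2
        (check, [i], result))
      ((0 : Int), ([] : List Char), ([] : List Char))).2.2 := by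
  induction l using List.reverseRecOn with
  | nil => refine ⟨rfl, rfl, Or.inl ⟨rfl, ?_⟩⟩; intro c h; simpa using h.length_le
  | append_singleton l x ih =>
    obtain ⟨ihp, ihc, ihr⟩ := ih
    rw [List.foldl_append, List.foldl_cons, List.foldl_nil]
    -- abbreviate the previous state
    generalize hst : (l.foldl
      (fun st i =>
        let check : Int := if [i] = st.2.1 then st.1 + 1 else 0
        let result := if 2 ≤ check ∧ st.2.2 < [i, i, i] then [i, i, i] else st.2.2
        (check, [i], result))
      ((0 : Int), ([] : List Char), ([] : List Char))) = st at ihp ihc ihr ⊢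
    simp only
    have hlast : (l ++ [x]).getLast? = some x := by simp
    have hcheck : (if [x] = st.2.1 then st.1 + 1 else 0)
        = (pvTrail (l ++ [x]) : Int) - 1 := by
      rw [pvTrail_append]
      rcases hgl : l.getLast? with _ | a
      · have hl : l = [] := by simpa using hgl
        subst hl
        rw [hgl] at ihp
        simp [ihp]
      · have hlne : l ≠ [] := by rintro rfl; simp at hgl
        rw [hgl] at ihp
        rw [ihc, if_neg hlne]
        by_cases hax : a = x
        · subst hax
          rw [if_pos (by rw [ihp]), if_pos rfl]
          have h1 : 1 ≤ pvTrail l := pvTrail_pos_of_ne_nil l hlne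
          push_cast
          omega
        · rw [if_neg (by rw [ihp]; simpa using Ne.symm hax),
            if_neg (by simpa using hax)]
          simp
    refine ⟨by rw [hlast], by rw [hcheck, if_neg (by simp)], ?_⟩
    have htr : (2 ≤ (if [x] = st.2.1 then st.1 + 1 else 0)) ↔ 3 ≤ pvTrail (l ++ [x]) := by
      rw [hcheck]; omega
    by_cases hrun : 3 ≤ pvTrail (l ++ [x])
    · -- x is a good character of l ++ [x]
      have hxgood : [x, x, x] <:+: (l ++ [x]) :=
        ((triple_suffix_iff_trail l x).mpr hrun).isInfix
      rcases ihr with ⟨hr, hnone⟩ | ⟨m, hr, hm, hmax⟩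
      · rw [if_pos ⟨htr.mpr hrun, by rw [hr]; exact List.nil_lt_cons _ _⟩]
        refine Or.inr ⟨x, rfl, hxgood, fun c hc => ?_⟩
        rcases (triple_infix_append l x c).mp hc with h | ⟨rfl, -⟩
        · exact absurd h (hnone c)
        · exact le_refl _
      · by_cases hlt : m < x
        · rw [if_pos ⟨htr.mpr hrun, by rw [hr]; exact (triple_lt_triple m x).mpr hlt⟩]
          refine Or.inr ⟨x, rfl, hxgood, fun c hc => ?_⟩
          rcases (triple_infix_append l x c).mp hc with h | ⟨rfl, -⟩
          · exact le_of_lt (lt_of_le_of_lt (hmax c h) hlt)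
          · exact le_refl _
        · rw [if_neg (by rw [hr, triple_lt_triple]; exact fun h => hlt h.2)]
          refine Or.inr ⟨m, hr, hm.trans ⟨[], [x], by simp⟩, fun c hc => ?_⟩
          rcases (triple_infix_append l x c).mp hc with h | ⟨rfl, -⟩
          · exact hmax c h
          · exact le_of_not_gt hlt
    · -- no new good character
      rw [if_neg (fun h => hrun (htr.mp h.1))]
      rcases ihr with ⟨hr, hnone⟩ | ⟨m, hr, hm, hmax⟩
      · refine Or.inl ⟨hr, fun c hc => ?_⟩
        rcases (triple_infix_append l x c).mp hc with h | ⟨-, h⟩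
        · exact hnone c h
        · exact hrun h
      · refine Or.inr ⟨m, hr, hm.trans ⟨[], [x], by simp⟩, fun c hc => ?_⟩
        rcases (triple_infix_append l x c).mp hc with h | ⟨-, h⟩
        · exact hmax c h
        · exact absurd h hrun

lemma mem_cands (l : List Char) (c : Char) :
    c ∈ (PySem.Set.ofList l).filter (fun c => PySem.Chars.isIn [c, c, c] l)
      ↔ [c, c, c] <:+: l := by
  rw [List.mem_filter]
  constructor
  · rintro ⟨-, h⟩
    exact (PySem.Chars.isIn_iff_infix _ _).mp h
  · intro h
    refine ⟨?_, (PySem.Chars.isIn_iff_infix _ _).mpr h⟩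
    rw [PySem.Set.mem_ofList]
    exact h.subset (by simp)

-- ===== VERDICT (by name: the statement is the Claim_ definition above) =====
theorem largestGoodInteger_spec : Claim_equal_largestGoodInteger := by
  intro num _
  unfold Spec_largestGoodInteger largestGoodInteger largestGoodInteger_alt
  obtain ⟨-, -, hres⟩ := foldA_spec num.toList
  simp only
  rcases hres with ⟨hr, hnone⟩ | ⟨m, hr, hm, hmax⟩
  · have hcnil : (PySem.Set.ofList num.toList).filter
        (fun c => PySem.Chars.isIn [c, c, c] num.toList) = [] := by
      rw [List.eq_nil_iff_forall_not_mem]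
      intro c hc
      exact hnone c ((mem_cands num.toList c).mp hc)
    rw [hr, hcnil]
    rfl
  · have hmem : m ∈ (PySem.Set.ofList num.toList).filter
        (fun c => PySem.Chars.isIn [c, c, c] num.toList) := (mem_cands num.toList m).mpr hm
    rcases hmx : PySem.List.max? ((PySem.Set.ofList num.toList).filter
        (fun c => PySem.Chars.isIn [c, c, c] num.toList)) (fun c => c) with _ | m'
    · rw [PySem.List.max?_eq_none_iff] at hmx
      rw [hmx] at hmem
      simp at hmem
    · have h1 : m' ≤ m := hmax m' ((mem_cands num.toList m').mp (PySem.List.max?_mem hmx))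
      have h2 : m ≤ m' := PySem.List.max?_isMax hmx m hmem
      rw [hr, le_antisymm h1 h2]
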